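-- pv_equiv track=rewrite | github.com/Nidhishree1209/Multimodal-Analysis-System | src/hand/hand_detector.py | _has_tolerance_match
-- ===== SOURCE A (Python) =====
-- def _has_tolerance_match(actual: str, expected: str) -> bool:
--     """
--     Check if finger states have tolerance matching (for noisy detection).
--
--     This allows for graceful degradation when detection is close but not exact,
--     handling the natural variance in MediaPipe hand landmark detection.
--
--     Args:
--         actual: Detected finger state.
--         expected: Expected finger state from rules.
--
--     Returns:
--         bool: True if states have tolerance match.
--     """
--     # Define tolerance groups - states that can match with lower confidence
--     tolerance_groups = [
--         # All straight/bent variants can loosely match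
--         ['straight', 'straight_spread', 'straight_angled_out', 'stretched_out',
--          'slightly_bent', 'bent', 'bent_forward', 'bent_forward_separated'],
--         # All folded variants
--         ['folded', 'folded_over_fingers', 'curved'],
--         # All touching states
--         ['touching_thumb', 'touching_index', 'touching_middle', 'touching_ring',
--          'touching_pinky', 'touching_index_and_middle', 'touching_middle_and_ring',
--          'touching_ring_and_pinky', 'touching_middle_ring_pinky',
--          'touching_all_fingertips', 'touching_base_of_ring'],
--     ]
--
--     for group in tolerance_groups:
--         if actual in group and expected in group:
--             return True
--     return False
-- ===== SOURCE B (Python) =====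
-- def _has_tolerance_match(actual: str, expected: str) -> bool:
--     tolerance_groups = [
--         ['straight', 'straight_spread', 'straight_angled_out', 'stretched_out',
--          'slightly_bent', 'bent', 'bent_forward', 'bent_forward_separated'],
--         ['folded', 'folded_over_fingers', 'curved'],
--         ['touching_thumb', 'touching_index', 'touching_middle', 'touching_ring',
--          'touching_pinky', 'touching_index_and_middle', 'touching_middle_and_ring',
--          'touching_ring_and_pinky', 'touching_middle_ring_pinky',
--          'touching_all_fingertips', 'touching_base_of_ring'],
--     ]
--     state_to_group = {s: i for i, g in enumerate(tolerance_groups) for s in g}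
--     g = state_to_group.get(actual)
--     return g is not None and g == state_to_group.get(expected)
-- ===== Notes on version B (the rewrite author's own statement) =====
-- stated objective: simpler
-- what changed: Replaces the loop over groups with two list-membership scans each by a single state-to-group index built once and one dict lookup per argument (guarded so two unknown states do not match).
import Mathlib
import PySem

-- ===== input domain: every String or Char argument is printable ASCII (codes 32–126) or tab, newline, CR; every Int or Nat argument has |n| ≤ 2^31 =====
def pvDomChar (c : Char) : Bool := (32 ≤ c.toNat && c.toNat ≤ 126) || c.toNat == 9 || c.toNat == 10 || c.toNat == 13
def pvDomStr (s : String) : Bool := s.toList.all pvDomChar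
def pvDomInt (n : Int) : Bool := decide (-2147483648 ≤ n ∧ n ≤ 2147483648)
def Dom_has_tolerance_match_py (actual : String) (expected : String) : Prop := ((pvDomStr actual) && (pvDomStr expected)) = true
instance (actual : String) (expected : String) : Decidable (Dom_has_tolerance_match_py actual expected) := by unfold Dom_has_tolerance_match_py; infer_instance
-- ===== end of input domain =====

-- B replaces A's loop over groups (two membership scans per group) by one state→group-index
-- dict built once, returning on a single guarded lookup per argument; objective: simpler.

-- ===== PORT A =====
-- the three tolerance groups, shared module data of both Pythons
def pvGroup1 : List String :=
  ["straight", "straight_spread", "straight_angled_out", "stretched_out",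
   "slightly_bent", "bent", "bent_forward", "bent_forward_separated"]
def pvGroup2 : List String := ["folded", "folded_over_fingers", "curved"]
def pvGroup3 : List String :=
  ["touching_thumb", "touching_index", "touching_middle", "touching_ring",
   "touching_pinky", "touching_index_and_middle", "touching_middle_and_ring",
   "touching_ring_and_pinky", "touching_middle_ring_pinky",
   "touching_all_fingertips", "touching_base_of_ring"]
def pvToleranceGroups : List (List String) := [pvGroup1, pvGroup2, pvGroup3]

-- 'for group in tolerance_groups: if actual in group and expected in group: return True' / 'return False'
def pvLoopA (actual : String) (expected : String) : List (List String) → Bool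
  | [] => false
  | group :: rest =>
      if group.contains actual && group.contains expected then true
      else pvLoopA actual expected rest

def has_tolerance_match_py (actual : String) (expected : String) : Bool :=
  pvLoopA actual expected pvToleranceGroups

-- ===== PORT B =====
-- state_to_group = {s: i for i, g in enumerate(tolerance_groups) for s in g}
def pvStateToGroup : PySem.Dict String Int :=
  (PySem.List.enumerate pvToleranceGroups).foldl
    (fun d ig => ig.2.foldl (fun d s => d.insert s ig.1) d) PySem.Dict.empty

-- g = state_to_group.get(actual); return g is not None and g == state_to_group.get(expected)
def has_tolerance_match_py_alt (actual : String) (expected : String) : Bool :=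
  match pvStateToGroup.get? actual with
  | none => false
  | some g => pvStateToGroup.get? expected == some g

-- ===== PRECONDITION & SPEC =====
def Spec_has_tolerance_match_py (actual : String) (expected : String) (out : Bool) : Prop := out = has_tolerance_match_py_alt actual expected
instance (actual : String) (expected : String) (out : Bool) : Decidable (Spec_has_tolerance_match_py actual expected out) := by unfold Spec_has_tolerance_match_py; infer_instance

-- ===== CLAIM (what is proved, stated in full; the proofs are below) =====
def Claim_equal_has_tolerance_match_py : Prop := ∀ (actual : String) (expected : String), Dom_has_tolerance_match_py actual expected → Spec_has_tolerance_match_py actual expected (has_tolerance_match_py actual expected)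

-- ===== LEMMAS AND PROOFS =====

-- the group index of a state, as a proof-side chain of membership tests
def pvGrp (s : String) : Option Int :=
  if s ∈ pvGroup1 then some 0
  else if s ∈ pvGroup2 then some 1
  else if s ∈ pvGroup3 then some 2
  else none

theorem pvGet?_eq_grp (s : String) : pvStateToGroup.get? s = pvGrp s := by
  have hd : pvStateToGroup = PySem.Dict.mk
      (pvGroup1.map (·, (0 : Int)) ++ pvGroup2.map (·, 1) ++ pvGroup3.map (·, 2)) := by
    rfl
  unfold pvGrp
  by_cases h1 : s ∈ pvGroup1
  · fin_cases h1 <;> rfl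
  · by_cases h2 : s ∈ pvGroup2
    · fin_cases h2 <;> simp_all <;> rfl
    · by_cases h3 : s ∈ pvGroup3
      · fin_cases h3 <;> simp_all <;> rfl
      · simp only [h1, h2, h3, if_false]
        simp [pvGroup1, pvGroup2, pvGroup3] at h1 h2 h3
        simp only [hd, PySem.Dict.get?_mk_cons, pvGroup1, pvGroup2, pvGroup3,
              List.map, List.cons_append, List.nil_append, beq_iff_eq]
        simp [eq_comm, h1, h2, h3]
        rfl

theorem pvContains1 (s : String) : pvGroup1.contains s = (pvGrp s == some 0) := by
  unfold pvGrp
  by_cases h1 : s ∈ pvGroup1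
  · simp [h1]
  · simp only [List.contains_eq_mem, h1, decide_false]
    split_ifs <;> simp_all

theorem pvContains2 (s : String) : pvGroup2.contains s = (pvGrp s == some 1) := by
  unfold pvGrp
  by_cases h2 : s ∈ pvGroup2
  · have h1 : s ∉ pvGroup1 := by fin_cases h2 <;> decide
    simp [h1, h2]
  · simp only [List.contains_eq_mem, h2, decide_false]
    split_ifs <;> simp_all

theorem pvContains3 (s : String) : pvGroup3.contains s = (pvGrp s == some 2) := by
  unfold pvGrp
  by_cases h3 : s ∈ pvGroup3
  · have h1 : s ∉ pvGroup1 := by fin_cases h3 <;> decide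
    have h2 : s ∉ pvGroup2 := by fin_cases h3 <;> decide
    simp [h1, h2, h3]
  · simp only [List.contains_eq_mem, h3, decide_false]
    split_ifs <;> simp_all

-- ===== VERDICT (by name: the statement is the Claim_ definition above) =====
theorem has_tolerance_match_py_spec : Claim_equal_has_tolerance_match_py := by
  intro a e _
  unfold Spec_has_tolerance_match_py has_tolerance_match_py has_tolerance_match_py_alt
  rw [pvGet?_eq_grp a, pvGet?_eq_grp e]
  simp only [pvToleranceGroups, pvLoopA, pvContains1, pvContains2, pvContains3]
  unfold pvGrp
  split_ifs <;> simp_all
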